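-- pv_equiv track=rewrite | github.com/AleFeri/advent_of_code_2024 | d15/part1.py | robot_exec_command
-- ===== SOURCE A (Python) =====
-- from typing import Tuple
--
-- def col_to_row(matrix: list[list[str]], col: int) -> list[str]:
--     return [row[col] for row in matrix]
--
-- def robot_can_exec_command(matrix: list[list[str]], pos: Tuple[int, int], command: str) -> bool:
--     x, y = pos
--
--     section = ''
--     match command:
--         case "^":
--             c_t_r = col_to_row(matrix, x)
--             section = ''.join(c_t_r[:y][::-1])
--         case ">":
--             section = ''.join(matrix[y][x:])
--         case "v":
--             c_t_r = col_to_row(matrix, x)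
--             section = ''.join(c_t_r[y:])
--         case "<":
--             section = ''.join(matrix[y][:x][::-1])
--
--     return "." in section and section.index(".") < section.index("#")
--
-- def translate_command_to_direction(command: str) -> Tuple[int, int]:
--     match command:
--         case "^":
--             return (0, -1)
--         case ">":
--             return (1, 0)
--         case "v":
--             return (0, 1)
--         case "<":
--             return (-1, 0)
--     return (0, 0)
--
-- def robot_exec_command(matrix: list[list[str]], pos: Tuple[int, int], command: str) -> list[list[str]]:
--     if not robot_can_exec_command(matrix, pos, command):
--         return matrix
--
--     x, y = pos
--     tx, ty = x, y
--     dx, dy = translate_command_to_direction(command)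
--     match command:
--         case "^":
--             section = col_to_row(matrix, x)[:y][::-1]
--             ty = y - col_to_row(matrix, x)[:y][::-1].index(".") - 1
--             for c_y in range(ty, y + 1):
--                 matrix[c_y][x] = matrix[c_y + (-dy)][x]
--         case ">":
--             section = matrix[y][x:]
--             tx = x + matrix[y][x:].index(".")
--             for c_x in range(tx, x, -1):
--                 matrix[y][c_x] = matrix[y][c_x + (-dx)]
--         case "v":
--             section = col_to_row(matrix, x)[y:]
--             ty = y + col_to_row(matrix, x)[y:].index(".")
--             for c_y in range(ty, y, -1):
--                 matrix[c_y][x] = matrix[c_y + (-dy)][x]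
--         case "<":
--             section = matrix[y][:x][::-1]
--             tx = x - matrix[y][:x][::-1].index(".") - 1
--             for c_x in range(tx, x+1):
--                 matrix[y][c_x] = matrix[y][c_x + (-dx)]
--
--     matrix[y][x] = "."
--
--     return matrix
-- ===== SOURCE B (Python) =====
-- def robot_exec_command(matrix, pos, command):
--     direction = {"^": (0, -1), ">": (1, 0), "v": (0, 1), "<": (-1, 0)}.get(command)
--     if direction is None:
--         return matrix
--     x, y = pos
--     dx, dy = direction
--     # walk from the neighbour cell towards the move until a wall, the edge, or a gap
--     cx, cy = x + dx, y + dy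
--     while 0 <= cy < len(matrix) and 0 <= cx < len(matrix[cy]) and matrix[cy][cx] not in (".", "#"):
--         cx += dx
--         cy += dy
--     if not (0 <= cy < len(matrix) and 0 <= cx < len(matrix[cy])) or matrix[cy][cx] != ".":
--         return matrix
--     # pull every cell from the gap back to the robot one step in the move direction
--     while (cx, cy) != (x, y):
--         matrix[cy][cx] = matrix[cy - dy][cx - dx]
--         cx -= dx
--         cy -= dy
--     matrix[y][x] = "."
--     return matrix
-- ===== Notes on version B (the rewrite author's own statement) =====
-- stated objective: simpler
-- what changed: B replaces A's four per-direction branches (joined-string legality scan with str.index, per-direction slices and shift loops) by one unified path: compute (dx,dy) once, walk cell by cell from the neighbour to the first '.' or '#', then pull the cells back one step in a single loop.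
-- outside the precondition, e.g. on robot_exec_command([['.', '#']], (-1, 0), '>'): A returns [['.', '#']], B returns [['#', '.']]
import Mathlib
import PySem

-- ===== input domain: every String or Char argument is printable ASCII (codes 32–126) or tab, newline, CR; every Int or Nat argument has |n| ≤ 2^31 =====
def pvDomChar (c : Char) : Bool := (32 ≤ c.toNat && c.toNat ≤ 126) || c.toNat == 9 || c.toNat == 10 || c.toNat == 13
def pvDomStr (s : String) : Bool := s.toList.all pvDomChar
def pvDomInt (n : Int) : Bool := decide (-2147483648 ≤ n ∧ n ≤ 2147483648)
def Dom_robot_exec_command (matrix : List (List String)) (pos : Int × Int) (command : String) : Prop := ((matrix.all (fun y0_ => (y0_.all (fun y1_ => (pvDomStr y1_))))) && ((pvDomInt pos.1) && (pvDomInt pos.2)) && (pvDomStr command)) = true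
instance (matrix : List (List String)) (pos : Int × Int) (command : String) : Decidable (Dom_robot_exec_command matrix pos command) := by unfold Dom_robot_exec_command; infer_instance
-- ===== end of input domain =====

-- B rewrites the four per-direction branches of A as one directional walk to the first gap
-- followed by one backward pull loop (objective: simpler).  Both A and B mutate `matrix` in
-- place in Python and return it; the equivalence proved here is about the returned value.

-- ===== PORT A =====

-- shared cell primitives: m[y][x] read / write (IndexError cases lie outside Pre_)
def pvGetCell (m : List (List String)) (y x : Int) : String :=
  PySem.List.pyGetD (PySem.List.pyGetD m y []) x ""

def pvSetCell (m : List (List String)) (y x : Int) (v : String) : List (List String) :=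
  PySem.List.pySetD m y (PySem.List.pySetD (PySem.List.pyGetD m y []) x v)

def pvColToRow (matrix : List (List String)) (col : Int) : List String :=
  matrix.map (fun row => PySem.List.pyGetD row col "")

def pvRobotCanExec (matrix : List (List String)) (pos : Int × Int) (command : String) : Bool :=
  let x := pos.1
  let y := pos.2
  let sec : String :=
    if command = "^" then
      PySem.Str.join "" ((PySem.List.slice? (PySem.List.slice (pvColToRow matrix x) none (some y)) none none (-1)).getD [])
    else if command = ">" then
      PySem.Str.join "" (PySem.List.slice (PySem.List.pyGetD matrix y []) (some x) none)
    else if command = "v" then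
      PySem.Str.join "" (PySem.List.slice (pvColToRow matrix x) (some y) none)
    else if command = "<" then
      PySem.Str.join "" ((PySem.List.slice? (PySem.List.slice (PySem.List.pyGetD matrix y []) none (some x)) none none (-1)).getD [])
    else ""
  PySem.Str.isIn "." sec && decide (PySem.Str.find sec "." < PySem.Str.find sec "#")

def pvTranslateCommandToDirection (command : String) : Int × Int :=
  if command = "^" then (0, -1)
  else if command = ">" then (1, 0)
  else if command = "v" then (0, 1)
  else if command = "<" then (-1, 0)
  else (0, 0)

def robot_exec_command (matrix : List (List String)) (pos : Int × Int) (command : String) : List (List String) :=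
  if !pvRobotCanExec matrix pos command then matrix
  else
    let x := pos.1
    let y := pos.2
    let d := pvTranslateCommandToDirection command
    let dx := d.1
    let dy := d.2
    let m1 :=
      if command = "^" then
        let ty := y - (((PySem.List.index? ((PySem.List.slice? (PySem.List.slice (pvColToRow matrix x) none (some y)) none none (-1)).getD []) ".").getD 0 : Int)) - 1
        (PySem.List.pyRange ty (y + 1) 1).foldl
          (fun m c_y => pvSetCell m c_y x (pvGetCell m (c_y + (-dy)) x)) matrix
      else if command = ">" then
        let tx := x + (((PySem.List.index? (PySem.List.slice (PySem.List.pyGetD matrix y []) (some x) none) ".").getD 0 : Int))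
        (PySem.List.pyRange tx x (-1)).foldl
          (fun m c_x => pvSetCell m y c_x (pvGetCell m y (c_x + (-dx)))) matrix
      else if command = "v" then
        let ty := y + (((PySem.List.index? (PySem.List.slice (pvColToRow matrix x) (some y) none) ".").getD 0 : Int))
        (PySem.List.pyRange ty y (-1)).foldl
          (fun m c_y => pvSetCell m c_y x (pvGetCell m (c_y + (-dy)) x)) matrix
      else if command = "<" then
        let tx := x - (((PySem.List.index? ((PySem.List.slice? (PySem.List.slice (PySem.List.pyGetD matrix y []) none (some x)) none none (-1)).getD []) ".").getD 0 : Int)) - 1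
        (PySem.List.pyRange tx (x + 1) 1).foldl
          (fun m c_x => pvSetCell m y c_x (pvGetCell m y (c_x + (-dx)))) matrix
      else matrix
    pvSetCell m1 y x "."

-- ===== PORT B =====

def pvDirs : PySem.Dict String (Int × Int) :=
  PySem.Dict.ofList [("^", (0, -1)), (">", (1, 0)), ("v", (0, 1)), ("<", (-1, 0))]

def pvInBounds (m : List (List String)) (cy cx : Int) : Bool :=
  decide (0 ≤ cy) && decide (cy < (m.length : Int)) &&
  decide (0 ≤ cx) && decide (cx < ((PySem.List.pyGetD m cy []).length : Int))

-- the first while loop of B: walk from (cx, cy) along (dx, dy) to the first "." (the gap);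
-- none = a wall or the edge of the grid stops the move (fuel only makes the loop structural)
def pvWalk (fuel : Nat) (m : List (List String)) (cx cy dx dy : Int) : Option (Int × Int) :=
  match fuel with
  | 0 => none
  | fuel + 1 =>
    if pvInBounds m cy cx then
      let c := pvGetCell m cy cx
      if c = "." then some (cx, cy)
      else if c = "#" then none
      else pvWalk fuel m (cx + dx) (cy + dy) dx dy
    else none

-- the second while loop of B: pull each cell one step forward, from the gap back to the robot
def pvShift (fuel : Nat) (m : List (List String)) (cx cy dx dy x y : Int) : List (List String) :=
  match fuel with
  | 0 => m
  | fuel + 1 =>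
    if cx = x ∧ cy = y then m
    else pvShift fuel (pvSetCell m cy cx (pvGetCell m (cy - dy) (cx - dx))) (cx - dx) (cy - dy) dx dy x y

def robot_exec_command_alt (matrix : List (List String)) (pos : Int × Int) (command : String) : List (List String) :=
  match pvDirs.get? command with
  | none => matrix
  | some (dx, dy) =>
    let x := pos.1
    let y := pos.2
    let fuel := matrix.length + (PySem.List.pyGetD matrix pos.2 []).length + 1
    match pvWalk fuel matrix (x + dx) (y + dy) dx dy with
    | none => matrix
    | some (gx, gy) => pvSetCell (pvShift fuel matrix gx gy dx dy x y) y x "."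

-- ===== PRECONDITION & SPEC =====

-- Pre_ excludes, for the four move commands only, the inputs where A raises (ValueError when the
-- scanned section has a "." but no "#"; IndexError when a legal "^"/"<" move starts on the last
-- row/column, on a ragged matrix, or out of range) and the degenerate corners where A's value is
-- accidental: a position that is negative (Python wraps it) or whose cell is itself "." or "#"
-- (no robot there; A's inclusion of the robot's own cell in the scanned section is incidental),
-- and matrices with non-single-character cells (A scans a joined string, B scans cells).
def Pre_robot_exec_command (matrix : List (List String)) (pos : Int × Int) (command : String) : Prop :=
  command ∈ ["^", ">", "v", "<"] →
    ((∀ row ∈ matrix, (row.length : Int) = ((matrix.headD []).length : Int) ∧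
        ∀ c ∈ row, c.toList.length = 1) ∧
     0 ≤ pos.1 ∧ pos.1 < ((matrix.headD []).length : Int) ∧
     0 ≤ pos.2 ∧ pos.2 < (matrix.length : Int) ∧
     (matrix.getD pos.2.toNat []).getD pos.1.toNat "" ≠ "." ∧
     (matrix.getD pos.2.toNat []).getD pos.1.toNat "" ≠ "#" ∧
     (let ray : List String :=
        if command = "^" then ((matrix.map (fun r => r.getD pos.1.toNat "")).take pos.2.toNat).reverse
        else if command = ">" then (matrix.getD pos.2.toNat []).drop (pos.1.toNat + 1)
        else if command = "v" then (matrix.map (fun r => r.getD pos.1.toNat "")).drop (pos.2.toNat + 1)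
        else ((matrix.getD pos.2.toNat []).take pos.1.toNat).reverse
      ("." ∈ ray → "#" ∈ ray) ∧
      (ray.find? (fun c => c == "." || c == "#") = some "." →
        (command = "^" → pos.2 < (matrix.length : Int) - 1) ∧
        (command = "<" → pos.1 < ((matrix.headD []).length : Int) - 1))))

instance (matrix : List (List String)) (pos : Int × Int) (command : String) : Decidable (Pre_robot_exec_command matrix pos command) := by unfold Pre_robot_exec_command; infer_instance

def pvWitness_robot_exec_command : List (List String) × (Int × Int) × String :=
  ([["#"], ["."], ["@"], ["#"]], (0, 2), "^")

def Spec_robot_exec_command (matrix : List (List String)) (pos : Int × Int) (command : String) (out : List (List String)) : Prop := out = robot_exec_command_alt matrix pos command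
instance (matrix : List (List String)) (pos : Int × Int) (command : String) (out : List (List String)) : Decidable (Spec_robot_exec_command matrix pos command out) := by unfold Spec_robot_exec_command; infer_instance

-- ===== CLAIM (what is proved, stated in full; the proofs are below) =====
def Claim_equal_robot_exec_command : Prop := ∀ (matrix : List (List String)) (pos : Int × Int) (command : String), Dom_robot_exec_command matrix pos command → Pre_robot_exec_command matrix pos command → Spec_robot_exec_command matrix pos command (robot_exec_command matrix pos command)

-- ===== LEMMAS AND PROOFS =====


-- singleton prefix/infix helpers
lemma pv_singleton_prefix (c : Char) (l : List Char) : [c] <+: l ↔ l.head? = some c := by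
  cases l with
  | nil => simp
  | cons a t => simp [List.cons_prefix_cons, eq_comm]

lemma pv_idxOf?_eq_some (c : Char) : ∀ (cs : List Char) (k : Nat),
    List.idxOf? c cs = some k ↔ (cs[k]? = some c ∧ ∀ j < k, cs[j]? ≠ some c) := by
  intro cs
  induction cs with
  | nil => intro k; simp [List.idxOf?]
  | cons a t ih =>
    intro k
    rw [List.idxOf?_cons]
    by_cases h : a = c
    · subst h
      simp only [beq_self_eq_true, if_pos]
      constructor
      · rintro hk; cases hk; simp
      · rintro ⟨h1, h2⟩
        cases k with
        | zero => rfl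
        | succ k' =>
          exfalso; exact h2 0 (by omega) (by simp)
    · simp only [beq_iff_eq, h]
      constructor
      · rintro hk
        rcases Option.map_eq_some_iff.mp hk with ⟨k', hk', rfl⟩
        have := (ih k').mp hk'
        refine ⟨by simpa using this.1, ?_⟩
        intro j hj
        cases j with
        | zero => simp; exact fun hc => h hc
        | succ j' => simpa using this.2 j' (by omega)
      · rintro ⟨h1, h2⟩
        cases k with
        | zero => simp at h1; exact absurd h1 h
        | succ k' =>
          have : List.idxOf? c t = some k' := by
            refine (ih k').mpr ⟨by simpa using h1, ?_⟩
            intro j hj; simpa using h2 (j+1) (by omega)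
          simp [this]

lemma pv_find_singleton (cs : List Char) (c : Char) :
    PySem.Chars.find cs [c] = (match List.idxOf? c cs with | none => (-1 : Int) | some k => (k : Int)) := by
  cases h : List.idxOf? c cs with
  | none =>
    have hmem : c ∉ cs := List.idxOf?_eq_none_iff.mp h
    simp only []
    exact (PySem.Chars.find_eq_neg_one_iff cs [c]).mpr (fun hin => hmem ((List.singleton_infix_iff c cs).mp hin))
  | some k =>
    have hmem : c ∈ cs := by
      by_contra hc
      simp [List.idxOf?_eq_none_iff.mpr hc] at h
    have hnn : 0 ≤ PySem.Chars.find cs [c] :=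
      (PySem.Chars.find_nonneg_iff cs [c]).mpr ((List.singleton_infix_iff c cs).mpr hmem)
    obtain ⟨hpre, hmin⟩ := PySem.Chars.find_spec hnn
    set t := (PySem.Chars.find cs [c]).toNat with ht
    have h1 : cs[t]? = some c := by
      have := (pv_singleton_prefix c _).mp hpre
      rwa [List.head?_drop] at this
    have h2 : ∀ j < t, cs[j]? ≠ some c := by
      intro j hj hc
      exact hmin j hj ((pv_singleton_prefix c _).mpr (by rwa [List.head?_drop]))
    have : List.idxOf? c cs = some t := (pv_idxOf?_eq_some c cs t).mpr ⟨h1, h2⟩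
    rw [this] at h
    have hk : t = k := Option.some.inj h
    simp only []
    omega

-- the canonical outcome of scanning a ray of cells: index of the first ".",
-- none when a "#" or the end of the ray comes first
def pvRaySpec : List String → Option Nat
  | [] => none
  | c :: t => if c = "." then some 0 else if c = "#" then none else (pvRaySpec t).map (· + 1)

def pvRaySpecC : List Char → Option Nat
  | [] => none
  | c :: t => if c = '.' then some 0 else if c = '#' then none else (pvRaySpecC t).map (· + 1)

def pvFInd (cs : List Char) (c : Char) : Int :=
  match List.idxOf? c cs with | none => (-1 : Int) | some k => (k : Int)

lemma pvFInd_nonneg_of_mem {cs : List Char} {c : Char} (h : c ∈ cs) : 0 ≤ pvFInd cs c := by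
  unfold pvFInd
  cases hh : List.idxOf? c cs with
  | none => exact absurd (List.idxOf?_eq_none_iff.mp hh) (by simpa using h)
  | some k => simp

lemma pvFInd_cons_of_ne {a c : Char} (h : a ≠ c) (t : List Char) :
    pvFInd (a :: t) c = (match List.idxOf? c t with | none => (-1 : Int) | some k => (k : Int) + 1) := by
  unfold pvFInd
  rw [List.idxOf?_cons]
  simp only [beq_iff_eq, h]
  cases List.idxOf? c t <;> simp

lemma pv_canexec_chars (cs : List Char) (hg : '.' ∈ cs → '#' ∈ cs) :
    (decide ('.' ∈ cs) && decide (pvFInd cs '.' < pvFInd cs '#')) = (pvRaySpecC cs).isSome := by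
  induction cs with
  | nil => simp [pvRaySpecC]
  | cons a t ih =>
    by_cases hd : a = '.'
    · subst hd
      have hh : '#' ∈ '.' :: t := hg (by simp)
      have hht : '#' ∈ t := by simpa using hh
      have h1 : pvFInd ('.' :: t) '.' = 0 := by unfold pvFInd; rw [List.idxOf?_cons]; simp
      have h2 : 0 < pvFInd ('.' :: t) '#' := by
        rw [pvFInd_cons_of_ne (by decide) t]
        cases hh2 : List.idxOf? '#' t with
        | none => exact absurd (List.idxOf?_eq_none_iff.mp hh2) (by simpa using hht)
        | some k => simp
      simp [pvRaySpecC, h1, h2]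
    · by_cases hw : a = '#'
      · subst hw
        have h1 : pvFInd ('#' :: t) '#' = 0 := by unfold pvFInd; rw [List.idxOf?_cons]; simp
        by_cases hm : '.' ∈ ('#' :: t)
        · have : 0 ≤ pvFInd ('#' :: t) '.' := pvFInd_nonneg_of_mem hm
          simp [pvRaySpecC, h1, hm, this]
        · simp [pvRaySpecC, hm]
      · have hmem : ('.' ∈ (a :: t)) = ('.' ∈ t) := by simp [Ne.symm hd]
        have hgt : '.' ∈ t → '#' ∈ t := by
          intro h
          have := hg (by simp [h])
          simpa [Ne.symm hw] using this
        have hrs : pvRaySpecC (a :: t) = (pvRaySpecC t).map (· + 1) := by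
          simp [pvRaySpecC, hd, hw]
        rw [hrs]
        simp only [Option.isSome_map]
        rw [← ih hgt]
        by_cases hm : '.' ∈ t
        · have hh : '#' ∈ t := hgt hm
          have e1 := pvFInd_cons_of_ne hd t
          have e2 := pvFInd_cons_of_ne hw t
          cases hd1 : List.idxOf? '.' t with
          | none => exact absurd (List.idxOf?_eq_none_iff.mp hd1) (by simpa using hm)
          | some k1 =>
            cases hd2 : List.idxOf? '#' t with
            | none => exact absurd (List.idxOf?_eq_none_iff.mp hd2) (by simpa using hh)
            | some k2 =>
              rw [hd1] at e1; rw [hd2] at e2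
              have f1 : pvFInd t '.' = (k1 : Int) := by unfold pvFInd; rw [hd1]
              have f2 : pvFInd t '#' = (k2 : Int) := by unfold pvFInd; rw [hd2]
              simp only [e1, e2, f1, f2, hmem]
              congr 1
              simp only [decide_eq_decide]
              exact add_lt_add_iff_right 1
        · simp [hmem, hm]

def pvCharOf (s : String) : Char := s.toList.headD ' '

lemma pv_toList_of_single {s : String} (hs : s.toList.length = 1) : s.toList = [pvCharOf s] := by
  unfold pvCharOf
  cases h : s.toList with
  | nil => rw [h] at hs; simp at hs
  | cons a t =>
    rw [h] at hs
    simp at hs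
    simp [hs]

lemma pv_single_eq_iff {s : String} (hs : s.toList.length = 1) (t : String) (c : Char)
    (ht : t.toList = [c]) : (s = t) ↔ pvCharOf s = c := by
  constructor
  · rintro rfl
    have := pv_toList_of_single hs
    rw [ht] at this
    simpa using this.symm
  · intro h
    have h1 : s.toList = t.toList := by rw [pv_toList_of_single hs, h, ht]
    exact String.toList_inj.mp h1

lemma pv_join_chars (sec : List String) (h1 : ∀ s ∈ sec, s.toList.length = 1) :
    (PySem.Str.join "" sec).toList = sec.map pvCharOf := by
  rw [PySem.Str.toList_join]
  have : sec.map String.toList = (sec.map pvCharOf).map (fun c => [c]) := by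
    rw [List.map_map]
    exact List.map_congr_left (fun s hs => pv_toList_of_single (h1 s hs))
  rw [this]
  have he : ("" : String).toList = ([] : List Char) := by decide
  rw [he]
  exact PySem.Chars.join_nil_singletons _

lemma pv_raySpecC_map (sec : List String) (h1 : ∀ s ∈ sec, s.toList.length = 1) :
    pvRaySpecC (sec.map pvCharOf) = pvRaySpec sec := by
  induction sec with
  | nil => rfl
  | cons s t ih =>
    have hs := h1 s (by simp)
    have ht : ∀ u ∈ t, u.toList.length = 1 := fun u hu => h1 u (by simp [hu])
    have hdot : (s = ".") ↔ pvCharOf s = '.' := pv_single_eq_iff hs "." '.' (by decide)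
    have hhash : (s = "#") ↔ pvCharOf s = '#' := pv_single_eq_iff hs "#" '#' (by decide)
    simp only [List.map_cons, pvRaySpecC, pvRaySpec, ← hdot, ← hhash, ih ht]

lemma pv_mem_map_charOf (sec : List String) (h1 : ∀ s ∈ sec, s.toList.length = 1) (t : String)
    (c : Char) (ht : t.toList = [c]) : ((t ∈ sec) ↔ c ∈ sec.map pvCharOf) := by
  constructor
  · intro h
    exact List.mem_map.mpr ⟨t, h, by unfold pvCharOf; rw [ht]; rfl⟩
  · intro h
    rcases List.mem_map.mp h with ⟨u, hu, hc⟩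
    have : u = t := by
      have h1u := h1 u hu
      exact (pv_single_eq_iff h1u t c ht).mpr hc
    rwa [this] at hu

-- A's legality check on a section of single-character cells is: the first "."/"#" cell is "."
lemma pv_canexec_sec (sec : List String) (h1 : ∀ s ∈ sec, s.toList.length = 1)
    (hg : "." ∈ sec → "#" ∈ sec) :
    (PySem.Str.isIn "." (PySem.Str.join "" sec) &&
      decide (PySem.Str.find (PySem.Str.join "" sec) "." < PySem.Str.find (PySem.Str.join "" sec) "#"))
    = (pvRaySpec sec).isSome := by
  have hj := pv_join_chars sec h1
  set cs := sec.map pvCharOf with hcs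
  have hmd := pv_mem_map_charOf sec h1 "." '.' (by decide)
  have hmh := pv_mem_map_charOf sec h1 "#" '#' (by decide)
  have hgc : '.' ∈ cs → '#' ∈ cs := fun h => hmh.mp (hg (hmd.mpr h))
  have hIn : PySem.Str.isIn "." (PySem.Str.join "" sec) = decide ('.' ∈ cs) := by
    rw [PySem.Str.isIn_eq]
    have hd : (".").toList = ['.'] := by decide
    rw [hd, hj]
    by_cases h : '.' ∈ cs
    · simp only [h, decide_true]
      exact (PySem.Chars.isIn_iff_infix _ _).mpr ((List.singleton_infix_iff _ _).mpr h)
    · simp only [h, decide_false]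
      rcases Bool.eq_false_or_eq_true (PySem.Chars.isIn ['.'] cs) with hb | hb
      · exact absurd ((List.singleton_infix_iff '.' cs).mp ((PySem.Chars.isIn_iff_infix ['.'] cs).mp hb)) h
      · exact hb
  have hFd : PySem.Str.find (PySem.Str.join "" sec) "." = pvFInd cs '.' := by
    rw [PySem.Str.find_eq, hj, show (".").toList = ['.'] by decide, pv_find_singleton]
    unfold pvFInd; rfl
  have hFh : PySem.Str.find (PySem.Str.join "" sec) "#" = pvFInd cs '#' := by
    rw [PySem.Str.find_eq, hj, show ("#").toList = ['#'] by decide, pv_find_singleton]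
    unfold pvFInd; rfl
  rw [hIn, hFd, hFh, pv_canexec_chars cs hgc, hcs, pv_raySpecC_map sec h1]

lemma pv_raySpec_index (sec : List String) (k : Nat) (h : pvRaySpec sec = some k) :
    PySem.List.index? sec "." = some k := by
  induction sec generalizing k with
  | nil => simp [pvRaySpec] at h
  | cons s t ih =>
    unfold pvRaySpec at h
    by_cases hd : s = "."
    · rw [if_pos hd] at h
      cases h
      rw [hd, PySem.List.index?_cons_self]
    · rw [if_neg hd] at h
      by_cases hh : s = "#"
      · rw [if_pos hh] at h; simp at h
      · rw [if_neg hh] at h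
        rcases Option.map_eq_some_iff.mp h with ⟨k', hk', rfl⟩
        rw [PySem.List.index?_cons_of_ne t (fun hc => hd hc), ih k' hk']
        rfl

lemma pv_raySpec_lt_length (sec : List String) (k : Nat) (h : pvRaySpec sec = some k) :
    k < sec.length := by
  induction sec generalizing k with
  | nil => simp [pvRaySpec] at h
  | cons s t ih =>
    unfold pvRaySpec at h
    by_cases hd : s = "."
    · rw [if_pos hd] at h; cases h; simp
    · rw [if_neg hd] at h
      by_cases hh : s = "#"
      · rw [if_pos hh] at h; simp at h
      · rw [if_neg hh] at h
        rcases Option.map_eq_some_iff.mp h with ⟨k', hk', rfl⟩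
        have := ih k' hk'
        simp; omega

-- the write sequence of a legal move: pull n cells one step, farthest (the gap) first
def pvShiftN (x y dx dy : Int) : Nat → List (List String) → List (List String)
  | 0, m => m
  | n + 1, m =>
    pvShiftN x y dx dy n
      (pvSetCell m (y + (n + 1) * dy) (x + (n + 1) * dx) (pvGetCell m (y + n * dy) (x + n * dx)))

lemma pv_walk_ray (m : List (List String)) (dx dy : Int) :
    ∀ (ray : List String) (sx sy : Int) (fuel : Nat),
      (∀ k : Nat, k < ray.length → pvGetCell m (sy + k * dy) (sx + k * dx) = ray.getD k "") →
      (∀ k : Nat, pvInBounds m (sy + k * dy) (sx + k * dx) = decide (k < ray.length)) →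
      ray.length < fuel →
      pvWalk fuel m sx sy dx dy = (pvRaySpec ray).map (fun k : Nat => (sx + (k : Int) * dx, sy + (k : Int) * dy)) := by
  intro ray
  induction ray with
  | nil =>
    intro sx sy fuel hcell hin hf
    have h0 := hin 0
    simp at h0
    cases fuel with
    | zero => omega
    | succ f => simp [pvWalk, h0, pvRaySpec]
  | cons c t ih =>
    intro sx sy fuel hcell hin hf
    cases fuel with
    | zero => omega
    | succ f =>
      have h0 : pvInBounds m sy sx = true := by
        have := hin 0; simp at this; exact this
      have hc0 : pvGetCell m sy sx = c := by
        have := hcell 0 (by simp); simpa using this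
      by_cases hd : c = "."
      · subst hd
        simp [pvWalk, h0, hc0, pvRaySpec]
      · by_cases hh : c = "#"
        · subst hh
          simp [pvWalk, h0, hc0, pvRaySpec, hd]
        · have hrec : pvWalk f m (sx + dx) (sy + dy) dx dy
              = (pvRaySpec t).map (fun k : Nat => (sx + dx + (k : Int) * dx, sy + dy + (k : Int) * dy)) := by
            apply ih
            · intro k hk
              have := hcell (k + 1) (by simpa using Nat.succ_lt_succ hk)
              have e1 : sy + (↑(k + 1) : Int) * dy = sy + dy + k * dy := by push_cast; ring
              have e2 : sx + (↑(k + 1) : Int) * dx = sx + dx + k * dx := by push_cast; ring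
              rw [e1, e2] at this
              simpa using this
            · intro k
              have := hin (k + 1)
              have e1 : sy + (↑(k + 1) : Int) * dy = sy + dy + k * dy := by push_cast; ring
              have e2 : sx + (↑(k + 1) : Int) * dx = sx + dx + k * dx := by push_cast; ring
              rw [e1, e2] at this
              rw [this]
              simp only [decide_eq_decide]
              simp
            · simp at hf; omega
          have hstep : pvWalk (f + 1) m sx sy dx dy = pvWalk f m (sx + dx) (sy + dy) dx dy := by
            simp [pvWalk, h0, hc0, hd, hh]
          rw [hstep, hrec]
          have hrs : pvRaySpec (c :: t) = (pvRaySpec t).map (· + 1) := by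
            simp [pvRaySpec, hd, hh]
          rw [hrs, Option.map_map]
          congr 1
          funext k
          simp only [Function.comp_apply, Prod.mk.injEq]
          constructor <;> (push_cast; ring)

lemma pv_shift_eq_shiftN (x y dx dy : Int)
    (hd : (dx = 0 ∧ dy = -1) ∨ (dx = 1 ∧ dy = 0) ∨ (dx = 0 ∧ dy = 1) ∨ (dx = -1 ∧ dy = 0)) :
    ∀ (n : Nat) (fuel : Nat) (m : List (List String)), n ≤ fuel →
      pvShift fuel m (x + n * dx) (y + n * dy) dx dy x y = pvShiftN x y dx dy n m := by
  intro n
  induction n with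
  | zero =>
    intro fuel m _
    cases fuel with
    | zero => simp [pvShift, pvShiftN]
    | succ f => simp [pvShift, pvShiftN]
  | succ n ih =>
    intro fuel m hn
    cases fuel with
    | zero => omega
    | succ f =>
      have hne : ¬(x + (↑(n + 1) : Int) * dx = x ∧ y + (↑(n + 1) : Int) * dy = y) := by
        rcases hd with ⟨h1, h2⟩ | ⟨h1, h2⟩ | ⟨h1, h2⟩ | ⟨h1, h2⟩ <;> subst h1 <;> subst h2 <;>
          (push_cast; intro hc; omega)
      rw [pvShift, if_neg hne]
      have e1 : x + (↑(n + 1) : Int) * dx - dx = x + n * dx := by push_cast; ring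
      have e2 : y + (↑(n + 1) : Int) * dy - dy = y + n * dy := by push_cast; ring
      rw [e1, e2, ih f _ (by omega)]
      show _ = pvShiftN x y dx dy (n + 1) m
      rw [pvShiftN]
      norm_cast

lemma pv_set_absorb (m : List (List String)) (y x : Int) (v : String)
    (hy : 0 ≤ y) (hx : 0 ≤ x) :
    pvSetCell (pvSetCell m y x v) y x "." = pvSetCell m y x "." := by
  unfold pvSetCell
  simp only [show ∀ (xs : List (List String)) (v : List String), PySem.List.pySetD xs y v = xs.set y.toNat v
      from fun xs v => PySem.List.pySetD_of_nonneg xs v hy,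
    show ∀ (xs : List String) (v : String), PySem.List.pySetD xs x v = xs.set x.toNat v
      from fun xs v => PySem.List.pySetD_of_nonneg xs v hx]
  by_cases hlt : y.toNat < m.length
  · have hrow : PySem.List.pyGetD (m.set y.toNat ((PySem.List.pyGetD m y []).set x.toNat v)) y []
        = (PySem.List.pyGetD m y []).set x.toNat v := by
      rw [PySem.List.pyGetD_eq_getElem _ _ hy (by simp; omega)]
      simp
    rw [hrow, List.set_set, List.set_set]
  · have hset : m.set y.toNat ((PySem.List.pyGetD m y []).set x.toNat v) = m := by
      apply List.set_eq_of_length_le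
      omega
    rw [hset]

lemma pv_fold_gt (y : Int) :
    ∀ (n : Nat) (x : Int) (m : List (List String)),
      (PySem.List.pyRange (x + n) x (-1)).foldl
          (fun m c => pvSetCell m y c (pvGetCell m y (c + -1))) m
        = pvShiftN x y 1 0 n m := by
  intro n
  induction n with
  | zero =>
    intro x m
    rw [show (x + (0 : Nat) = x) by simp, PySem.List.pyRange_neg_one_eq_nil le_rfl]
    simp [pvShiftN]
  | succ n ih =>
    intro x m
    rw [PySem.List.pyRange_neg_one_cons (by push_cast; omega)]
    rw [List.foldl_cons]
    rw [show (x + ↑(n + 1) - 1 : Int) = x + n by push_cast; ring]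
    rw [ih]
    show _ = pvShiftN x y 1 0 (n + 1) m
    rw [pvShiftN]
    congr 2
    · omega
    · omega
    · congr 1 <;> omega

lemma pv_fold_dn (x : Int) :
    ∀ (n : Nat) (y : Int) (m : List (List String)),
      (PySem.List.pyRange (y + n) y (-1)).foldl
          (fun m c => pvSetCell m c x (pvGetCell m (c + -1) x)) m
        = pvShiftN x y 0 1 n m := by
  intro n
  induction n with
  | zero =>
    intro y m
    rw [show (y + (0 : Nat) = y) by simp, PySem.List.pyRange_neg_one_eq_nil le_rfl]
    simp [pvShiftN]
  | succ n ih =>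
    intro y m
    rw [PySem.List.pyRange_neg_one_cons (by push_cast; omega)]
    rw [List.foldl_cons]
    rw [show (y + ↑(n + 1) - 1 : Int) = y + n by push_cast; ring]
    rw [ih]
    show _ = pvShiftN x y 0 1 (n + 1) m
    rw [pvShiftN]
    congr 2
    · omega
    · omega
    · congr 1 <;> omega

lemma pv_fold_lt (y : Int) :
    ∀ (n : Nat) (x : Int) (m : List (List String)),
      (PySem.List.pyRange (x - n) x 1).foldl
          (fun m c => pvSetCell m y c (pvGetCell m y (c + 1))) m
        = pvShiftN x y (-1) 0 n m := by
  intro n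
  induction n with
  | zero =>
    intro x m
    rw [show (x - (0 : Nat) = x) by simp, PySem.List.pyRange_one_eq_nil le_rfl]
    simp [pvShiftN]
  | succ n ih =>
    intro x m
    rw [PySem.List.pyRange_one_cons (by push_cast; omega)]
    rw [List.foldl_cons]
    rw [show (x - ↑(n + 1) + 1 : Int) = x - n by push_cast; ring]
    rw [ih]
    show _ = pvShiftN x y (-1) 0 (n + 1) m
    rw [pvShiftN]
    congr 2
    · omega
    · omega
    · congr 1 <;> omega

lemma pv_fold_up (x : Int) :
    ∀ (n : Nat) (y : Int) (m : List (List String)),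
      (PySem.List.pyRange (y - n) y 1).foldl
          (fun m c => pvSetCell m c x (pvGetCell m (c + 1) x)) m
        = pvShiftN x y 0 (-1) n m := by
  intro n
  induction n with
  | zero =>
    intro y m
    rw [show (y - (0 : Nat) = y) by simp, PySem.List.pyRange_one_eq_nil le_rfl]
    simp [pvShiftN]
  | succ n ih =>
    intro y m
    rw [PySem.List.pyRange_one_cons (by push_cast; omega)]
    rw [List.foldl_cons]
    rw [show (y - ↑(n + 1) + 1 : Int) = y - n by push_cast; ring]
    rw [ih]
    show _ = pvShiftN x y 0 (-1) (n + 1) m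
    rw [pvShiftN]
    congr 2
    · omega
    · omega
    · congr 1 <;> omega

lemma pv_col_eq (matrix : List (List String)) (xn : Nat)
    (hrect : ∀ row ∈ matrix, (row.length : Int) = ((matrix.headD []).length : Int))
    (hxW : (xn : Int) < ((matrix.headD []).length : Int)) :
    pvColToRow matrix (xn : Int) = matrix.map (fun r => r.getD xn "") := by
  unfold pvColToRow
  apply List.map_congr_left
  intro r hr
  have hlen : xn < r.length := by have := hrect r hr; omega
  rw [PySem.List.pyGetD_eq_getElem _ _ (by positivity) (by exact_mod_cast hlen),
    List.getD_eq_getElem _ _ hlen]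
  simp

lemma pv_col_single (matrix : List (List String)) (xn : Nat)
    (hrect : ∀ row ∈ matrix, (row.length : Int) = ((matrix.headD []).length : Int) ∧
      ∀ c ∈ row, c.toList.length = 1)
    (hxW : (xn : Int) < ((matrix.headD []).length : Int)) :
    ∀ s ∈ matrix.map (fun r => r.getD xn ""), s.toList.length = 1 := by
  intro s hs
  rcases List.mem_map.mp hs with ⟨r, hr, rfl⟩
  have hlen : xn < r.length := by have := (hrect r hr).1; omega
  rw [List.getD_eq_getElem _ _ hlen]
  exact (hrect r hr).2 _ (List.getElem_mem _)

lemma pv_col_getD (matrix : List (List String)) (xn : Nat) (j : Nat) (hj : j < matrix.length) :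
    (matrix.map (fun r => r.getD xn "")).getD j "" = matrix[j].getD xn "" := by
  rw [List.getD_eq_getElem _ _ (by simpa using hj)]
  simp

lemma pv_dirs_get_none (c : String) (h1 : c ≠ "^") (h2 : c ≠ ">") (h3 : c ≠ "v") (h4 : c ≠ "<") :
    pvDirs.get? c = none := by
  have e : pvDirs = PySem.Dict.mk [("^", (0, -1)), (">", (1, 0)), ("v", (0, 1)), ("<", (-1, 0))] := rfl
  rw [e]
  simp [Ne.symm h1, Ne.symm h2, Ne.symm h3, Ne.symm h4, PySem.Dict.get?]

lemma pv_getD_drop (l : List String) (n i : Nat) (d : String) :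
    (l.drop n).getD i d = l.getD (n + i) d := by
  simp [List.getD, List.getElem?_drop]


-- ===== VERDICT (by name: the statement is the Claim_ definition above) =====
set_option maxHeartbeats 1600000 in
theorem robot_exec_command_spec : Claim_equal_robot_exec_command := by
  unfold Claim_equal_robot_exec_command
  intro matrix pos command _hdom hpre
  unfold Spec_robot_exec_command
  obtain ⟨px, py⟩ := pos
  by_cases hc2 : command = ">"
  · subst hc2
    have hp := hpre (by simp)
    simp only at hp
    obtain ⟨hrect, hx0, hxW, hy0, hyH, hrd, hrh, hray⟩ := hp
    simp only [String.reduceEq, reduceIte] at hray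
    obtain ⟨hg, _hedge⟩ := hray
    clear _hedge
    obtain ⟨xn, rfl⟩ : ∃ n : Nat, px = (n : Int) := ⟨px.toNat, by omega⟩
    obtain ⟨yn, rfl⟩ : ∃ n : Nat, py = (n : Int) := ⟨py.toNat, by omega⟩
    simp only [Int.toNat_natCast] at hrd hrh hg
    have hyH' : yn < matrix.length := by exact_mod_cast hyH
    have hrowget : PySem.List.pyGetD matrix (yn : Int) [] = matrix[yn] := by
      rw [PySem.List.pyGetD_eq_getElem _ _ (by positivity) (by exact_mod_cast hyH')]
      simp
    have hrowlen : matrix[yn].length = (matrix.headD []).length := by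
      exact_mod_cast (hrect matrix[yn] (List.getElem_mem _)).1
    have hxrow : xn < matrix[yn].length := by rw [hrowlen]; exact_mod_cast hxW
    have hrowmem : ∀ s ∈ matrix[yn], s.toList.length = 1 :=
      (hrect matrix[yn] (List.getElem_mem _)).2
    have hrgetD : (matrix.getD yn []).getD xn "" = matrix[yn][xn] := by
      rw [List.getD_eq_getElem _ _ hyH', List.getD_eq_getElem _ _ hxrow]
    rw [hrgetD] at hrd hrh
    have hgD : (matrix.getD yn []) = matrix[yn] := List.getD_eq_getElem _ _ hyH'
    rw [hgD] at hg
    -- the section A scans and the ray B walks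
    have hdropcons : matrix[yn].drop xn = matrix[yn][xn] :: matrix[yn].drop (xn + 1) :=
      List.drop_eq_getElem_cons hxrow
    set rest := matrix[yn].drop (xn + 1) with hrest
    -- A's legality test
    have hcan : pvRobotCanExec matrix ((xn : Int), (yn : Int)) ">"
        = (pvRaySpec (matrix[yn][xn] :: rest)).isSome := by
      unfold pvRobotCanExec
      simp only [String.reduceEq, reduceIte]
      rw [hrowget, PySem.List.slice_from_natCast, hdropcons]
      apply pv_canexec_sec
      · intro s hs
        rw [← hdropcons] at hs
        exact hrowmem s (List.mem_of_mem_drop hs)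
      · intro hm
        have hm' : ("." : String) ∈ rest := by
          rcases List.mem_cons.mp hm with h | h
          · exact absurd h.symm hrd
          · exact h
        exact List.mem_cons_of_mem _ (hg hm')
    have hspec_cons : pvRaySpec (matrix[yn][xn] :: rest) = (pvRaySpec rest).map (· + 1) := by
      simp [pvRaySpec, hrd, hrh]
    -- B's walk
    have hwalk : pvWalk (matrix.length + (PySem.List.pyGetD matrix (yn : Int) []).length + 1)
        matrix ((xn : Int) + 1) ((yn : Int) + 0) 1 0
        = (pvRaySpec rest).map (fun k : Nat => ((xn : Int) + 1 + (k : Int) * 1, (yn : Int) + 0 + (k : Int) * 0)) := by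
      apply pv_walk_ray
      · intro k hk
        have hklen : xn + 1 + k < matrix[yn].length := by
          have := hk
          rw [hrest, List.length_drop] at this
          omega
        unfold pvGetCell
        have e1 : ((yn : Int) + 0 + (k : Int) * 0) = (yn : Int) := by ring
        have e2 : ((xn : Int) + 1 + (k : Int) * 1) = ((xn + 1 + k : Nat) : Int) := by push_cast; ring
        rw [e1, e2, hrowget, PySem.List.pyGetD_eq_getElem _ _ (by positivity) (by exact_mod_cast hklen)]
        rw [hrest, pv_getD_drop, List.getD_eq_getElem _ _ (by omega)]
        congr 1
      · intro k
        unfold pvInBounds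
        have e1 : ((yn : Int) + 0 + (k : Int) * 0) = (yn : Int) := by ring
        have e2 : ((xn : Int) + 1 + (k : Int) * 1) = ((xn + 1 + k : Nat) : Int) := by push_cast; ring
        rw [e1, e2, hrowget]
        have hrl : rest.length = matrix[yn].length - (xn + 1) := by
          rw [hrest, List.length_drop]
        rw [show (decide (0 ≤ (yn : Int)) && decide ((yn : Int) < (matrix.length : Int)) &&
            decide (0 ≤ ((xn + 1 + k : Nat) : Int)) &&
            decide (((xn + 1 + k : Nat) : Int) < (matrix[yn].length : Int)))
            = decide (k < rest.length) from by
          rw [Bool.eq_iff_iff]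
          simp only [Bool.and_eq_true, decide_eq_true_eq]
          constructor
          · rintro ⟨⟨⟨_, _⟩, _⟩, h4⟩; omega
          · intro h; refine ⟨⟨⟨by positivity, by exact_mod_cast hyH'⟩, by positivity⟩, by omega⟩]
      · have : rest.length ≤ matrix[yn].length := by rw [hrest]; simp
        rw [hrowget]
        omega
    -- discharge by cases on the scan outcome
    cases hS : pvRaySpec rest with
    | none =>
      have hcanf : pvRobotCanExec matrix ((xn : Int), (yn : Int)) ">" = false := by
        rw [hcan, hspec_cons, hS]; rfl
      have hA : robot_exec_command matrix ((xn : Int), (yn : Int)) ">" = matrix := by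
        unfold robot_exec_command
        rw [hcanf]
        rfl
      have hB : robot_exec_command_alt matrix ((xn : Int), (yn : Int)) ">" = matrix := by
        simp only [robot_exec_command_alt, show pvDirs.get? ">" = some ((1 : Int), (0 : Int)) from rfl]
        rw [hwalk, hS]
        rfl
      rw [hA, hB]
    | some k =>
      have hkrest : k < rest.length := pv_raySpec_lt_length rest k hS
      have hcant : pvRobotCanExec matrix ((xn : Int), (yn : Int)) ">" = true := by
        rw [hcan, hspec_cons, hS]; rfl
      have hidx : PySem.List.index? (matrix[yn].drop xn) "." = some (k + 1) := by
        rw [hdropcons, PySem.List.index?_cons_of_ne _ hrd,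
          pv_raySpec_index rest k hS]
        rfl
      have hA : robot_exec_command matrix ((xn : Int), (yn : Int)) ">"
          = pvSetCell (pvShiftN (xn : Int) (yn : Int) 1 0 (k + 1) matrix) (yn : Int) (xn : Int) "." := by
        unfold robot_exec_command
        rw [hcant]
        simp only [Bool.not_true, Bool.false_eq_true, if_false, String.reduceEq, reduceIte,
          pvTranslateCommandToDirection]
        rw [hrowget, PySem.List.slice_from_natCast, hidx]
        simp only [Option.getD_some]
        rw [pv_fold_gt (yn : Int) (k + 1) (xn : Int) matrix]
      have hB : robot_exec_command_alt matrix ((xn : Int), (yn : Int)) ">"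
          = pvSetCell (pvShiftN (xn : Int) (yn : Int) 1 0 (k + 1) matrix) (yn : Int) (xn : Int) "." := by
        simp only [robot_exec_command_alt, show pvDirs.get? ">" = some ((1 : Int), (0 : Int)) from rfl]
        rw [hwalk, hS]
        simp only [Option.map_some]
        have eg : ((xn : Int) + 1 + (k : Int) * 1) = (xn : Int) + ((k + 1 : Nat) : Int) * 1 := by push_cast; ring
        have eh : ((yn : Int) + 0 + (k : Int) * 0) = (yn : Int) + ((k + 1 : Nat) : Int) * 0 := by push_cast; ring
        rw [eg, eh, pv_shift_eq_shiftN (xn : Int) (yn : Int) 1 0 (Or.inr (Or.inl ⟨rfl, rfl⟩)) (k + 1) _ matrix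
          (by rw [hrowget]; have : rest.length ≤ matrix[yn].length := by rw [hrest]; simp
              omega)]
      rw [hA, hB]
  · by_cases hc3 : command = "v"
    · subst hc3
      have hp := hpre (by simp)
      simp only at hp
      obtain ⟨hrect, hx0, hxW, hy0, hyH, hrd, hrh, hray⟩ := hp
      simp only [String.reduceEq, reduceIte] at hray
      obtain ⟨hg, _hedge⟩ := hray
      clear _hedge
      obtain ⟨xn, rfl⟩ : ∃ n : Nat, px = (n : Int) := ⟨px.toNat, by omega⟩
      obtain ⟨yn, rfl⟩ : ∃ n : Nat, py = (n : Int) := ⟨py.toNat, by omega⟩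
      simp only [Int.toNat_natCast] at hrd hrh hg
      have hyH' : yn < matrix.length := by exact_mod_cast hyH
      have hcol : pvColToRow matrix (xn : Int) = matrix.map (fun r => r.getD xn "") :=
        pv_col_eq matrix xn (fun r hr => (hrect r hr).1) hxW
      set col := matrix.map (fun r => r.getD xn "") with hcoldef
      have hcollen : col.length = matrix.length := by rw [hcoldef]; simp
      have hyncol : yn < col.length := by omega
      have hxrow : xn < matrix[yn].length := by
        have := (hrect matrix[yn] (List.getElem_mem _)).1; omega
      have hcolyn : col[yn]'(by omega) = matrix[yn][xn] := by
        simp only [hcoldef, List.getElem_map]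
        rw [List.getD_eq_getElem _ _ hxrow]
      have hrgetD : (matrix.getD yn []).getD xn "" = matrix[yn][xn] := by
        rw [List.getD_eq_getElem _ _ hyH', List.getD_eq_getElem _ _ hxrow]
      rw [hrgetD] at hrd hrh
      have hdropcons : col.drop yn = matrix[yn][xn] :: col.drop (yn + 1) := by
        rw [List.drop_eq_getElem_cons (by omega : yn < col.length), hcolyn]
      set rest := col.drop (yn + 1) with hrest
      have hrestlen : rest.length = matrix.length - (yn + 1) := by
        rw [hrest, List.length_drop, hcollen]
      have hrowget : PySem.List.pyGetD matrix (yn : Int) [] = matrix[yn] := by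
        rw [PySem.List.pyGetD_eq_getElem _ _ (by positivity) (by exact_mod_cast hyH')]
        simp
      have hsingle : ∀ s ∈ col.drop yn, s.toList.length = 1 := fun s hs =>
        pv_col_single matrix xn hrect hxW s (List.mem_of_mem_drop hs)
      have hcan : pvRobotCanExec matrix ((xn : Int), (yn : Int)) "v"
          = (pvRaySpec (matrix[yn][xn] :: rest)).isSome := by
        unfold pvRobotCanExec
        simp only [String.reduceEq, reduceIte]
        rw [hcol, PySem.List.slice_from_natCast, hdropcons]
        apply pv_canexec_sec
        · intro s hs
          rw [← hdropcons] at hs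
          exact hsingle s hs
        · intro hm
          have hm2 : ("." : String) ∈ rest := by
            rcases List.mem_cons.mp hm with h | h
            · exact absurd h.symm hrd
            · exact h
          exact List.mem_cons_of_mem _ (hg hm2)
      have hspec_cons : pvRaySpec (matrix[yn][xn] :: rest) = (pvRaySpec rest).map (· + 1) := by
        simp [pvRaySpec, hrd, hrh]
      have hwalk : pvWalk (matrix.length + (PySem.List.pyGetD matrix (yn : Int) []).length + 1)
          matrix ((xn : Int) + 0) ((yn : Int) + 1) 0 1
          = (pvRaySpec rest).map (fun k : Nat => ((xn : Int) + 0 + (k : Int) * 0, (yn : Int) + 1 + (k : Int) * 1)) := by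
        apply pv_walk_ray
        · intro k hk
          have hjH : yn + 1 + k < matrix.length := by omega
          have hxr2 : xn < matrix[yn + 1 + k].length := by
            have := (hrect matrix[yn + 1 + k] (List.getElem_mem _)).1; omega
          have hrow2 : PySem.List.pyGetD matrix ((yn + 1 + k : Nat) : Int) [] = matrix[yn + 1 + k] := by
            rw [PySem.List.pyGetD_eq_getElem _ _ (by positivity) (by exact_mod_cast hjH)]
            congr 1
          unfold pvGetCell
          rw [show ((xn : Int) + 0 + (k : Int) * 0) = (xn : Int) by ring,
            show ((yn : Int) + 1 + (k : Int) * 1) = ((yn + 1 + k : Nat) : Int) by push_cast; ring,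
            hrow2,
            PySem.List.pyGetD_eq_getElem _ _ (by positivity) (by exact_mod_cast hxr2),
            hrest, pv_getD_drop, pv_col_getD matrix xn _ hjH, List.getD_eq_getElem _ _ hxr2]
          congr 1
        · intro k
          unfold pvInBounds
          rw [show ((xn : Int) + 0 + (k : Int) * 0) = (xn : Int) by ring,
            show ((yn : Int) + 1 + (k : Int) * 1) = ((yn + 1 + k : Nat) : Int) by push_cast; ring]
          by_cases hlt : yn + 1 + k < matrix.length
          · have hrow2 : PySem.List.pyGetD matrix ((yn + 1 + k : Nat) : Int) [] = matrix[yn + 1 + k] := by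
              rw [PySem.List.pyGetD_eq_getElem _ _ (by positivity) (by exact_mod_cast hlt)]
              congr 1
            rw [hrow2]
            have hxr2 : xn < matrix[yn + 1 + k].length := by
              have := (hrect matrix[yn + 1 + k] (List.getElem_mem _)).1; omega
            rw [Bool.eq_iff_iff]
            simp only [Bool.and_eq_true, decide_eq_true_eq]
            constructor
            · intro _; omega
            · intro _
              refine ⟨⟨⟨by positivity, by exact_mod_cast hlt⟩, by positivity⟩, by exact_mod_cast hxr2⟩
          · rw [Bool.eq_iff_iff]
            simp only [Bool.and_eq_true, decide_eq_true_eq]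
            constructor
            · rintro ⟨⟨⟨_, h2⟩, _⟩, _⟩
              exfalso
              have : yn + 1 + k < matrix.length := by exact_mod_cast h2
              omega
            · intro h; omega
        · rw [hrowget]; omega
      cases hS : pvRaySpec rest with
      | none =>
        have hcanf : pvRobotCanExec matrix ((xn : Int), (yn : Int)) "v" = false := by
          rw [hcan, hspec_cons, hS]; rfl
        have hA : robot_exec_command matrix ((xn : Int), (yn : Int)) "v" = matrix := by
          unfold robot_exec_command
          rw [hcanf]
          rfl
        have hB : robot_exec_command_alt matrix ((xn : Int), (yn : Int)) "v" = matrix := by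
          simp only [robot_exec_command_alt, show pvDirs.get? "v" = some ((0 : Int), (1 : Int)) from rfl]
          rw [hwalk, hS]
          rfl
        rw [hA, hB]
      | some k =>
        have hkrest : k < rest.length := pv_raySpec_lt_length rest k hS
        have hcant : pvRobotCanExec matrix ((xn : Int), (yn : Int)) "v" = true := by
          rw [hcan, hspec_cons, hS]; rfl
        have hidx : PySem.List.index? (col.drop yn) "." = some (k + 1) := by
          rw [hdropcons, PySem.List.index?_cons_of_ne _ hrd, pv_raySpec_index rest k hS]
          rfl
        have hA : robot_exec_command matrix ((xn : Int), (yn : Int)) "v"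
            = pvSetCell (pvShiftN (xn : Int) (yn : Int) 0 1 (k + 1) matrix) (yn : Int) (xn : Int) "." := by
          unfold robot_exec_command
          rw [hcant]
          simp only [Bool.not_true, Bool.false_eq_true, if_false, String.reduceEq, reduceIte,
            pvTranslateCommandToDirection]
          rw [hcol, PySem.List.slice_from_natCast, hidx]
          simp only [Option.getD_some]
          rw [pv_fold_dn (xn : Int) (k + 1) (yn : Int) matrix]
        have hB : robot_exec_command_alt matrix ((xn : Int), (yn : Int)) "v"
            = pvSetCell (pvShiftN (xn : Int) (yn : Int) 0 1 (k + 1) matrix) (yn : Int) (xn : Int) "." := by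
          simp only [robot_exec_command_alt, show pvDirs.get? "v" = some ((0 : Int), (1 : Int)) from rfl]
          rw [hwalk, hS]
          simp only [Option.map_some]
          have eg : ((xn : Int) + 0 + (k : Int) * 0) = (xn : Int) + ((k + 1 : Nat) : Int) * 0 := by push_cast; ring
          have eh : ((yn : Int) + 1 + (k : Int) * 1) = (yn : Int) + ((k + 1 : Nat) : Int) * 1 := by push_cast; ring
          rw [eg, eh, pv_shift_eq_shiftN (xn : Int) (yn : Int) 0 1 (Or.inr (Or.inr (Or.inl ⟨rfl, rfl⟩))) (k + 1) _ matrix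
            (by rw [hrowget]; omega)]
        rw [hA, hB]
    · by_cases hc1 : command = "^"
      · subst hc1
        have hp := hpre (by simp)
        simp only at hp
        obtain ⟨hrect, hx0, hxW, hy0, hyH, hrd, hrh, hray⟩ := hp
        simp only [String.reduceEq, reduceIte] at hray
        obtain ⟨hg, _hedge⟩ := hray
        clear _hedge
        obtain ⟨xn, rfl⟩ : ∃ n : Nat, px = (n : Int) := ⟨px.toNat, by omega⟩
        obtain ⟨yn, rfl⟩ : ∃ n : Nat, py = (n : Int) := ⟨py.toNat, by omega⟩
        simp only [Int.toNat_natCast] at hrd hrh hg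
        have hyH' : yn < matrix.length := by exact_mod_cast hyH
        have hcol : pvColToRow matrix (xn : Int) = matrix.map (fun r => r.getD xn "") :=
          pv_col_eq matrix xn (fun r hr => (hrect r hr).1) hxW
        set col := matrix.map (fun r => r.getD xn "") with hcoldef
        have hcollen : col.length = matrix.length := by rw [hcoldef]; simp
        set ray := (col.take yn).reverse with hraydef
        have hraylen : ray.length = yn := by
          rw [hraydef, List.length_reverse, List.length_take]
          omega
        have hrowget : PySem.List.pyGetD matrix (yn : Int) [] = matrix[yn] := by
          rw [PySem.List.pyGetD_eq_getElem _ _ (by positivity) (by exact_mod_cast hyH')]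
          simp
        have hsingle : ∀ s ∈ ray, s.toList.length = 1 := by
          intro s hs
          rw [hraydef] at hs
          exact pv_col_single matrix xn hrect hxW s (List.mem_of_mem_take (List.mem_reverse.mp hs))
        -- each ray cell is the matrix cell above the robot
        have hraycell : ∀ j : Nat, j < yn → ∀ (hj2 : j < ray.length),
            ray[j] = (matrix[yn - 1 - j]'(by omega)).getD xn "" := by
          intro j hj hj2
          simp only [hraydef, List.getElem_reverse]
          have hjt : (List.take yn col).length - 1 - j = yn - 1 - j := by
            rw [List.length_take]; omega
          simp only [List.getElem_take, hjt]
          simp only [hcoldef, List.getElem_map]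
        have hcan : pvRobotCanExec matrix ((xn : Int), (yn : Int)) "^"
            = (pvRaySpec ray).isSome := by
          unfold pvRobotCanExec
          simp only [String.reduceEq, reduceIte]
          rw [hcol, PySem.List.slice_to_natCast, PySem.List.slice?_none_none_neg_one]
          simp only [Option.getD_some]
          exact pv_canexec_sec ray hsingle hg
        have hwalk : pvWalk (matrix.length + (PySem.List.pyGetD matrix (yn : Int) []).length + 1)
            matrix ((xn : Int) + 0) ((yn : Int) + -1) 0 (-1)
            = (pvRaySpec ray).map (fun k : Nat => ((xn : Int) + 0 + (k : Int) * 0, (yn : Int) + -1 + (k : Int) * (-1))) := by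
          apply pv_walk_ray
          · intro k hk
            have hkyn : k < yn := by omega
            have hjH : yn - 1 - k < matrix.length := by omega
            have hxr2 : xn < (matrix[yn - 1 - k]'(by omega)).length := by
              have := (hrect (matrix[yn - 1 - k]'(by omega)) (List.getElem_mem _)).1; omega
            have hrow2 : PySem.List.pyGetD matrix ((yn - 1 - k : Nat) : Int) [] = matrix[yn - 1 - k]'(by omega) := by
              rw [PySem.List.pyGetD_eq_getElem _ _ (by positivity) (by exact_mod_cast hjH)]
              congr 1
            unfold pvGetCell
            rw [show ((xn : Int) + 0 + (k : Int) * 0) = (xn : Int) by ring,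
              show ((yn : Int) + -1 + (k : Int) * (-1)) = ((yn - 1 - k : Nat) : Int) by omega,
              hrow2,
              PySem.List.pyGetD_eq_getElem _ _ (by positivity) (by exact_mod_cast hxr2),
              List.getD_eq_getElem _ _ hk, hraycell k hkyn hk,
              List.getD_eq_getElem _ _ hxr2]
            congr 1
          · intro k
            unfold pvInBounds
            rw [show ((xn : Int) + 0 + (k : Int) * 0) = (xn : Int) by ring]
            by_cases hlt : k < yn
            · have hjH : yn - 1 - k < matrix.length := by omega
              have hrow2 : PySem.List.pyGetD matrix ((yn : Int) + -1 + (k : Int) * (-1)) [] = matrix[yn - 1 - k]'(by omega) := by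
                rw [show ((yn : Int) + -1 + (k : Int) * (-1)) = ((yn - 1 - k : Nat) : Int) by omega]
                rw [PySem.List.pyGetD_eq_getElem _ _ (by positivity) (by exact_mod_cast hjH)]
                congr 1
              rw [hrow2]
              have hxr2 : xn < (matrix[yn - 1 - k]'(by omega)).length := by
                have := (hrect (matrix[yn - 1 - k]'(by omega)) (List.getElem_mem _)).1; omega
              rw [Bool.eq_iff_iff]
              simp only [Bool.and_eq_true, decide_eq_true_eq]
              constructor
              · intro _; omega
              · intro _
                refine ⟨⟨⟨by omega, by omega⟩, by positivity⟩, by exact_mod_cast hxr2⟩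
            · rw [Bool.eq_iff_iff]
              simp only [Bool.and_eq_true, decide_eq_true_eq]
              constructor
              · rintro ⟨⟨⟨h1, _⟩, _⟩, _⟩
                exfalso
                omega
              · intro h; omega
          · rw [hrowget]; omega
        cases hS : pvRaySpec ray with
        | none =>
          have hcanf : pvRobotCanExec matrix ((xn : Int), (yn : Int)) "^" = false := by
            rw [hcan, hS]; rfl
          have hA : robot_exec_command matrix ((xn : Int), (yn : Int)) "^" = matrix := by
            unfold robot_exec_command
            rw [hcanf]
            rfl
          have hB : robot_exec_command_alt matrix ((xn : Int), (yn : Int)) "^" = matrix := by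
            simp only [robot_exec_command_alt, show pvDirs.get? "^" = some ((0 : Int), (-1 : Int)) from rfl]
            rw [hwalk, hS]
            rfl
          rw [hA, hB]
        | some k =>
          have hkray : k < ray.length := pv_raySpec_lt_length ray k hS
          have hcant : pvRobotCanExec matrix ((xn : Int), (yn : Int)) "^" = true := by
            rw [hcan, hS]; rfl
          have hidx : PySem.List.index? ray "." = some k := pv_raySpec_index ray k hS
          have hA : robot_exec_command matrix ((xn : Int), (yn : Int)) "^"
              = pvSetCell (pvShiftN (xn : Int) (yn : Int) 0 (-1) (k + 1) matrix) (yn : Int) (xn : Int) "." := by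
            unfold robot_exec_command
            rw [hcant]
            simp only [Bool.not_true, Bool.false_eq_true, if_false, String.reduceEq, reduceIte,
              pvTranslateCommandToDirection, neg_neg]
            rw [hcol, PySem.List.slice_to_natCast, PySem.List.slice?_none_none_neg_one]
            simp only [Option.getD_some]
            rw [hidx]
            simp only [Option.getD_some]
            rw [show ((yn : Int) - (k : Nat) - 1) = (yn : Int) - ((k + 1 : Nat) : Int) by push_cast; ring]
            rw [PySem.List.pyRange_one_succ_right (by push_cast; omega)]
            rw [List.foldl_append]
            rw [pv_fold_up (xn : Int) (k + 1) (yn : Int) matrix]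
            simp only [List.foldl_cons, List.foldl_nil]
            exact pv_set_absorb _ _ _ _ (by positivity) (by positivity)
          have hB : robot_exec_command_alt matrix ((xn : Int), (yn : Int)) "^"
              = pvSetCell (pvShiftN (xn : Int) (yn : Int) 0 (-1) (k + 1) matrix) (yn : Int) (xn : Int) "." := by
            simp only [robot_exec_command_alt, show pvDirs.get? "^" = some ((0 : Int), (-1 : Int)) from rfl]
            rw [hwalk, hS]
            simp only [Option.map_some]
            have eg : ((xn : Int) + 0 + (k : Int) * 0) = (xn : Int) + ((k + 1 : Nat) : Int) * 0 := by push_cast; ring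
            have eh : ((yn : Int) + -1 + (k : Int) * (-1)) = (yn : Int) + ((k + 1 : Nat) : Int) * (-1) := by push_cast; ring
            rw [eg, eh, pv_shift_eq_shiftN (xn : Int) (yn : Int) 0 (-1) (Or.inl ⟨rfl, rfl⟩) (k + 1) _ matrix
              (by rw [hrowget]; omega)]
          rw [hA, hB]
      · by_cases hc4 : command = "<"
        · subst hc4
          have hp := hpre (by simp)
          simp only at hp
          obtain ⟨hrect, hx0, hxW, hy0, hyH, hrd, hrh, hray⟩ := hp
          simp only [String.reduceEq, reduceIte] at hray
          obtain ⟨hg, _hedge⟩ := hray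
          clear _hedge
          obtain ⟨xn, rfl⟩ : ∃ n : Nat, px = (n : Int) := ⟨px.toNat, by omega⟩
          obtain ⟨yn, rfl⟩ : ∃ n : Nat, py = (n : Int) := ⟨py.toNat, by omega⟩
          simp only [Int.toNat_natCast] at hrd hrh hg
          have hyH' : yn < matrix.length := by exact_mod_cast hyH
          have hrowget : PySem.List.pyGetD matrix (yn : Int) [] = matrix[yn] := by
            rw [PySem.List.pyGetD_eq_getElem _ _ (by positivity) (by exact_mod_cast hyH')]
            simp
          have hrowlen : matrix[yn].length = (matrix.headD []).length := by
            exact_mod_cast (hrect matrix[yn] (List.getElem_mem _)).1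
          have hxrow : xn < matrix[yn].length := by rw [hrowlen]; exact_mod_cast hxW
          have hrowmem : ∀ s ∈ matrix[yn], s.toList.length = 1 :=
            (hrect matrix[yn] (List.getElem_mem _)).2
          have hgD : (matrix.getD yn []) = matrix[yn] := List.getD_eq_getElem _ _ hyH'
          rw [hgD] at hg
          set ray := (matrix[yn].take xn).reverse with hraydef
          have hraylen : ray.length = xn := by
            rw [hraydef, List.length_reverse, List.length_take]
            omega
          have hsingle : ∀ s ∈ ray, s.toList.length = 1 := by
            intro s hs
            rw [hraydef] at hs
            exact hrowmem s (List.mem_of_mem_take (List.mem_reverse.mp hs))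
          have hraycell : ∀ j : Nat, j < xn → ∀ (hj2 : j < ray.length),
              ray[j] = matrix[yn][xn - 1 - j]'(by omega) := by
            intro j hj hj2
            simp only [hraydef, List.getElem_reverse]
            have hjt : (List.take xn matrix[yn]).length - 1 - j = xn - 1 - j := by
              rw [List.length_take]; omega
            simp only [List.getElem_take, hjt]
          have hcan : pvRobotCanExec matrix ((xn : Int), (yn : Int)) "<"
              = (pvRaySpec ray).isSome := by
            unfold pvRobotCanExec
            simp only [String.reduceEq, reduceIte]
            rw [hrowget, PySem.List.slice_to_natCast, PySem.List.slice?_none_none_neg_one]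
            simp only [Option.getD_some]
            exact pv_canexec_sec ray hsingle hg
          have hwalk : pvWalk (matrix.length + (PySem.List.pyGetD matrix (yn : Int) []).length + 1)
              matrix ((xn : Int) + -1) ((yn : Int) + 0) (-1) 0
              = (pvRaySpec ray).map (fun k : Nat => ((xn : Int) + -1 + (k : Int) * (-1), (yn : Int) + 0 + (k : Int) * 0)) := by
            apply pv_walk_ray
            · intro k hk
              have hkxn : k < xn := by omega
              have hjr : xn - 1 - k < matrix[yn].length := by omega
              unfold pvGetCell
              rw [show ((yn : Int) + 0 + (k : Int) * 0) = (yn : Int) by ring,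
                show ((xn : Int) + -1 + (k : Int) * (-1)) = ((xn - 1 - k : Nat) : Int) by omega,
                hrowget,
                PySem.List.pyGetD_eq_getElem _ _ (by positivity) (by exact_mod_cast hjr),
                List.getD_eq_getElem _ _ hk, hraycell k hkxn hk]
              congr 1
            · intro k
              unfold pvInBounds
              rw [show ((yn : Int) + 0 + (k : Int) * 0) = (yn : Int) by ring, hrowget]
              rw [Bool.eq_iff_iff]
              simp only [Bool.and_eq_true, decide_eq_true_eq]
              constructor
              · rintro ⟨⟨⟨_, _⟩, h3⟩, _⟩
                omega
              · intro h
                refine ⟨⟨⟨by positivity, by exact_mod_cast hyH'⟩, by omega⟩, by omega⟩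
            · rw [hrowget]; omega
          cases hS : pvRaySpec ray with
          | none =>
            have hcanf : pvRobotCanExec matrix ((xn : Int), (yn : Int)) "<" = false := by
              rw [hcan, hS]; rfl
            have hA : robot_exec_command matrix ((xn : Int), (yn : Int)) "<" = matrix := by
              unfold robot_exec_command
              rw [hcanf]
              rfl
            have hB : robot_exec_command_alt matrix ((xn : Int), (yn : Int)) "<" = matrix := by
              simp only [robot_exec_command_alt, show pvDirs.get? "<" = some ((-1 : Int), (0 : Int)) from rfl]
              rw [hwalk, hS]
              rfl
            rw [hA, hB]
          | some k =>
            have hkray : k < ray.length := pv_raySpec_lt_length ray k hS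
            have hcant : pvRobotCanExec matrix ((xn : Int), (yn : Int)) "<" = true := by
              rw [hcan, hS]; rfl
            have hidx : PySem.List.index? ray "." = some k := pv_raySpec_index ray k hS
            have hA : robot_exec_command matrix ((xn : Int), (yn : Int)) "<"
                = pvSetCell (pvShiftN (xn : Int) (yn : Int) (-1) 0 (k + 1) matrix) (yn : Int) (xn : Int) "." := by
              unfold robot_exec_command
              rw [hcant]
              simp only [Bool.not_true, Bool.false_eq_true, if_false, String.reduceEq, reduceIte,
                pvTranslateCommandToDirection, neg_neg]
              rw [hrowget, PySem.List.slice_to_natCast, PySem.List.slice?_none_none_neg_one]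
              simp only [Option.getD_some]
              rw [hidx]
              simp only [Option.getD_some]
              rw [show ((xn : Int) - (k : Nat) - 1) = (xn : Int) - ((k + 1 : Nat) : Int) by push_cast; ring]
              rw [PySem.List.pyRange_one_succ_right (by push_cast; omega)]
              rw [List.foldl_append]
              rw [pv_fold_lt (yn : Int) (k + 1) (xn : Int) matrix]
              simp only [List.foldl_cons, List.foldl_nil]
              exact pv_set_absorb _ _ _ _ (by positivity) (by positivity)
            have hB : robot_exec_command_alt matrix ((xn : Int), (yn : Int)) "<"
                = pvSetCell (pvShiftN (xn : Int) (yn : Int) (-1) 0 (k + 1) matrix) (yn : Int) (xn : Int) "." := by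
              simp only [robot_exec_command_alt, show pvDirs.get? "<" = some ((-1 : Int), (0 : Int)) from rfl]
              rw [hwalk, hS]
              simp only [Option.map_some]
              have eg : ((xn : Int) + -1 + (k : Int) * (-1)) = (xn : Int) + ((k + 1 : Nat) : Int) * (-1) := by push_cast; ring
              have eh : ((yn : Int) + 0 + (k : Int) * 0) = (yn : Int) + ((k + 1 : Nat) : Int) * 0 := by push_cast; ring
              rw [eg, eh, pv_shift_eq_shiftN (xn : Int) (yn : Int) (-1) 0 (Or.inr (Or.inr (Or.inr ⟨rfl, rfl⟩))) (k + 1) _ matrix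
                (by rw [hrowget]; omega)]
            rw [hA, hB]
        · -- not a move command: both sides return the matrix unchanged
          have hcanf : pvRobotCanExec matrix (px, py) command = false := by
            unfold pvRobotCanExec
            simp only [if_neg hc1, if_neg hc2, if_neg hc3, if_neg hc4]
            rfl
          have hA : robot_exec_command matrix (px, py) command = matrix := by
            unfold robot_exec_command
            rw [hcanf]
            rfl
          have hB : robot_exec_command_alt matrix (px, py) command = matrix := by
            simp only [robot_exec_command_alt, pv_dirs_get_none command hc1 hc2 hc3 hc4]
          rw [hA, hB]
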